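-- pv_equiv track=rewrite | github.com/patriciaschaffer/seed-lab | python-projects/small-language-model.py | simple_rhyme_check
-- ===== SOURCE A (Python) =====
-- def simple_rhyme_check(word1, word2):
--     """Basic rhyme detection based on word endings"""
--     if len(word1) < 2 or len(word2) < 2:
--         return False
--     # Check if words end with similar sounds (simple heuristic)
--     endings = [
--         ('ing', 'ing'), ('ed', 'ed'), ('ly', 'ly'), ('er', 'er'), ('est', 'est'),
--         ('tion', 'tion'), ('ness', 'ness'), ('ment', 'ment'), ('able', 'able'),
--         ('ight', 'ight'), ('ought', 'ought'), ('ay', 'ay'), ('ey', 'ey'),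
--         ('ow', 'ow'), ('ew', 'ew'), ('oo', 'oo'), ('ee', 'ee'), ('ea', 'ea'),
--         ('ie', 'ie'), ('ue', 'ue'), ('ar', 'ar'), ('or', 'or'), ('ur', 'ur')
--     ]
--
--     word1_lower = word1.lower()
--     word2_lower = word2.lower()
--
--     for end1, end2 in endings:
--         if word1_lower.endswith(end1) and word2_lower.endswith(end2):
--             return True
--
--     # Check for same last 2-3 characters
--     if len(word1) >= 3 and len(word2) >= 3:
--         if word1_lower[-3:] == word2_lower[-3:]:
--             return True
--     if len(word1) >= 2 and len(word2) >= 2: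
--         if word1_lower[-2:] == word2_lower[-2:]:
--             return True
--
--     return False
-- ===== SOURCE B (Python) =====
-- def simple_rhyme_check(word1, word2):
--     """Basic rhyme detection based on word endings"""
--     if len(word1) < 2 or len(word2) < 2:
--         return False
--     # Every table entry in the original is a symmetric pair (s, s) with len(s) >= 2,
--     # and the last-3 check implies the last-2 check, so the whole test collapses to
--     # comparing the lowercased last two characters.
--     return word1.lower()[-2:] == word2.lower()[-2:]
-- ===== Notes on version B (the rewrite author's own statement) =====
-- stated objective: simpler
-- what changed: Drops the 23-entry endings table, the endswith loop and the last-3 comparison: since every table entry is a symmetric pair of length >= 2 and a last-3 match implies a last-2 match, the whole test reduces to comparing the lowercased last two characters after the length guard.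
import Mathlib
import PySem

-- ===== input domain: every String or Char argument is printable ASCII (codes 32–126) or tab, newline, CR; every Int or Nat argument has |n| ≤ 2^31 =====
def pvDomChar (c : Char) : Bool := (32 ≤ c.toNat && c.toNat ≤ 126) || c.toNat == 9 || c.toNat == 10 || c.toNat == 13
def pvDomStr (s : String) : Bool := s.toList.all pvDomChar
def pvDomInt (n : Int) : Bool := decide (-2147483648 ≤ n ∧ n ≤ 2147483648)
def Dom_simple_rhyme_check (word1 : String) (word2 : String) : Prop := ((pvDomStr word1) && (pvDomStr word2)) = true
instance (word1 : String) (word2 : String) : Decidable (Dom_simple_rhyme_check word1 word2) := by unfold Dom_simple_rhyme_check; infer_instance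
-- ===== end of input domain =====

-- B drops A's endings table, endswith loop and last-3 comparison; after the length
-- guard it just compares the lowercased last two characters (objective: simpler).

-- ===== PORT A =====
-- A's literal endings table
def pvEndings : List (String × String) :=
  [("ing", "ing"), ("ed", "ed"), ("ly", "ly"), ("er", "er"), ("est", "est"),
   ("tion", "tion"), ("ness", "ness"), ("ment", "ment"), ("able", "able"),
   ("ight", "ight"), ("ought", "ought"), ("ay", "ay"), ("ey", "ey"),
   ("ow", "ow"), ("ew", "ew"), ("oo", "oo"), ("ee", "ee"), ("ea", "ea"),
   ("ie", "ie"), ("ue", "ue"), ("ar", "ar"), ("or", "or"), ("ur", "ur")]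

def simple_rhyme_check (word1 : String) (word2 : String) : Bool :=
  if PySem.Str.len word1 < 2 ∨ PySem.Str.len word2 < 2 then
    false
  else
    let word1_lower := PySem.Str.lower word1
    let word2_lower := PySem.Str.lower word2
    -- 'for end1, end2 in endings: if …: return True' as a first-hit scan
    if pvEndings.any (fun p =>
         PySem.Str.endswith word1_lower p.1 && PySem.Str.endswith word2_lower p.2) then
      true
    else if (3 ≤ PySem.Str.len word1 ∧ 3 ≤ PySem.Str.len word2) ∧
            PySem.Str.slice word1_lower (some (-3)) none
              = PySem.Str.slice word2_lower (some (-3)) none then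
      true
    else if (2 ≤ PySem.Str.len word1 ∧ 2 ≤ PySem.Str.len word2) ∧
            PySem.Str.slice word1_lower (some (-2)) none
              = PySem.Str.slice word2_lower (some (-2)) none then
      true
    else
      false

-- ===== PORT B =====
def simple_rhyme_check_alt (word1 : String) (word2 : String) : Bool :=
  if PySem.Str.len word1 < 2 ∨ PySem.Str.len word2 < 2 then
    false
  else
    PySem.Str.slice (PySem.Str.lower word1) (some (-2)) none
      = PySem.Str.slice (PySem.Str.lower word2) (some (-2)) none

-- ===== PRECONDITION & SPEC =====
def Spec_simple_rhyme_check (word1 : String) (word2 : String) (out : Bool) : Prop := out = simple_rhyme_check_alt word1 word2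
instance (word1 : String) (word2 : String) (out : Bool) : Decidable (Spec_simple_rhyme_check word1 word2 out) := by unfold Spec_simple_rhyme_check; infer_instance

-- ===== CLAIM (what is proved, stated in full; the proofs are below) =====
def Claim_equal_simple_rhyme_check : Prop := ∀ (word1 : String) (word2 : String), Dom_simple_rhyme_check word1 word2 → Spec_simple_rhyme_check word1 word2 (simple_rhyme_check word1 word2)

-- ===== LEMMAS AND PROOFS =====

-- the last k characters of s are determined by any suffix of length ≥ k
theorem pv_suffix_drop_eq {α : Type} (p s : List α) (k : Nat)
    (h : p <:+ s) (hk : k ≤ p.length) :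
    s.drop (s.length - k) = p.drop (p.length - k) := by
  obtain ⟨t, rfl⟩ := h
  have h : (t ++ p).length - k = t.length + (p.length - k) := by
    simp [List.length_append]; omega
  have h0 : List.drop (t.length + (p.length - k)) t = [] :=
    List.drop_eq_nil_of_le (by omega)
  rw [h, List.drop_append, h0, List.nil_append, Nat.add_sub_cancel_left]

-- every entry of A's table is a symmetric pair of length ≥ 2
theorem pv_endings_sym :
    ∀ p ∈ pvEndings, p.2 = p.1 ∧ 2 ≤ p.1.toList.length := by decide

theorem pv_last3_last2 {α : Type} (xs ys : List α)
    (h : xs.drop (xs.length - 3) = ys.drop (ys.length - 3))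
    (h1 : 3 ≤ xs.length) (h2 : 3 ≤ ys.length) :
    xs.drop (xs.length - 2) = ys.drop (ys.length - 2) := by
  have e1 : xs.drop (xs.length - 2) = (xs.drop (xs.length - 3)).drop 1 := by
    rw [List.drop_drop]; congr 1; omega
  have e2 : ys.drop (ys.length - 2) = (ys.drop (ys.length - 3)).drop 1 := by
    rw [List.drop_drop]; congr 1; omega
  rw [e1, e2, h]

-- ===== VERDICT (by name: the statement is the Claim_ definition above) =====
theorem simple_rhyme_check_spec : Claim_equal_simple_rhyme_check := by
  intro word1 word2 _
  unfold Spec_simple_rhyme_check simple_rhyme_check simple_rhyme_check_alt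
  by_cases hshort : PySem.Str.len word1 < 2 ∨ PySem.Str.len word2 < 2
  · rw [if_pos hshort, if_pos hshort]
  · rw [if_neg hshort, if_neg hshort]
    simp only []
    set l1 := (PySem.Str.lower word1).toList with hl1
    set l2 := (PySem.Str.lower word2).toList with hl2
    have hlen1 : PySem.Str.len word1 = (l1.length : Int) := by
      simp [hl1, PySem.Str.toList_lower, PySem.Chars.lower, PySem.Str.len_eq]
    have hlen2 : PySem.Str.len word2 = (l2.length : Int) := by
      simp [hl2, PySem.Str.toList_lower, PySem.Chars.lower, PySem.Str.len_eq]
    have hge1 : 2 ≤ l1.length := by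
      rcases not_or.mp hshort with ⟨h1, _⟩; rw [hlen1] at h1; omega
    have hge2 : 2 ≤ l2.length := by
      rcases not_or.mp hshort with ⟨_, h2⟩; rw [hlen2] at h2; omega
    -- string equality of the [-k:] slices, as list equality of final drops
    have hs2 : (PySem.Str.slice (PySem.Str.lower word1) (some (-2)) none
          = PySem.Str.slice (PySem.Str.lower word2) (some (-2)) none)
        ↔ l1.drop (l1.length - 2) = l2.drop (l2.length - 2) := by
      rw [← String.toList_inj, PySem.Str.toList_slice, PySem.Str.toList_slice,
        PySem.Chars.slice_eq_listSlice, PySem.Chars.slice_eq_listSlice,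
        PySem.List.slice_from_neg_ofNat _ 2 (by norm_num),
        PySem.List.slice_from_neg_ofNat _ 2 (by norm_num)]
    have hs3 : (PySem.Str.slice (PySem.Str.lower word1) (some (-3)) none
          = PySem.Str.slice (PySem.Str.lower word2) (some (-3)) none)
        ↔ l1.drop (l1.length - 3) = l2.drop (l2.length - 3) := by
      rw [← String.toList_inj, PySem.Str.toList_slice, PySem.Str.toList_slice,
        PySem.Chars.slice_eq_listSlice, PySem.Chars.slice_eq_listSlice,
        PySem.List.slice_from_neg_ofNat _ 3 (by norm_num),
        PySem.List.slice_from_neg_ofNat _ 3 (by norm_num)]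
    by_cases h2eq : l1.drop (l1.length - 2) = l2.drop (l2.length - 2)
    · -- B is true; A's last branch (at the latest) fires
      have hb : (PySem.Str.slice (PySem.Str.lower word1) (some (-2)) none
          = PySem.Str.slice (PySem.Str.lower word2) (some (-2)) none) := hs2.mpr h2eq
      split_ifs with hA1 hA2 hA3
      · exact (decide_eq_true hb).symm
      · exact (decide_eq_true hb).symm
      · exact (decide_eq_true hb).symm
      · exact absurd ⟨⟨by omega, by omega⟩, hb⟩ hA3
    · -- B is false; show no branch of A can fire
      have hb : ¬ (PySem.Str.slice (PySem.Str.lower word1) (some (-2)) none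
          = PySem.Str.slice (PySem.Str.lower word2) (some (-2)) none) :=
        fun h => h2eq (hs2.mp h)
      have hany : pvEndings.any (fun p =>
          PySem.Str.endswith (PySem.Str.lower word1) p.1 &&
          PySem.Str.endswith (PySem.Str.lower word2) p.2) = false := by
        rw [List.any_eq_false]
        intro p hp
        rcases pv_endings_sym p hp with ⟨hsym, hlenp⟩
        simp only [Bool.and_eq_true, not_and]
        intro he1 he2
        rw [hsym] at he2
        rw [PySem.Str.endswith_eq, PySem.Chars.endswith_iff] at he1 he2
        exact absurd
          ((pv_suffix_drop_eq p.1.toList l1 2 he1 hlenp).trans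
            (pv_suffix_drop_eq p.1.toList l2 2 he2 hlenp).symm) h2eq
      have h3 : ¬ ((3 ≤ PySem.Str.len word1 ∧ 3 ≤ PySem.Str.len word2) ∧
          PySem.Str.slice (PySem.Str.lower word1) (some (-3)) none
            = PySem.Str.slice (PySem.Str.lower word2) (some (-3)) none) := by
        rintro ⟨⟨ha, hb'⟩, heq3⟩
        rw [hlen1] at ha; rw [hlen2] at hb'
        exact h2eq (pv_last3_last2 l1 l2 (hs3.mp heq3) (by omega) (by omega))
      have hc2 : ¬ ((2 ≤ PySem.Str.len word1 ∧ 2 ≤ PySem.Str.len word2) ∧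
          PySem.Str.slice (PySem.Str.lower word1) (some (-2)) none
            = PySem.Str.slice (PySem.Str.lower word2) (some (-2)) none) :=
        fun hc => hb hc.2
      rw [if_neg (by simp only [hany, Bool.false_eq_true, not_false_eq_true]), if_neg h3, if_neg hc2, decide_eq_false hb]
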